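-- pv_equiv track=rewrite | github.com/muralcode/mural-asset-generator | mural-asset-gen/ios_pbxproj.py | get_build_file_line_start
-- ===== SOURCE A (Python) =====
-- def get_build_file_line_start(pbxproj_contents, tag, start=0):
--     """
--     :param pbxproj_contents: line by line list of the pbxproj file content
--     :param tag: the c-style comment that marks the starting point of the data sought after
--     :param start: offset into the buffer
--     :return: the line where the tag was found, -1 if not found
--     """
--     build_line_start = 0
--
--     for pbxproj_line in pbxproj_contents:
--         # if a custom starting line was given
--         if start != 0:
--             # and we are not currently on that line:
--             if build_line_start != start:
--                 # increment line counter
--                 build_line_start = build_line_start + 1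
--                 # and restart loop
--                 continue
--         pbxproj_line = pbxproj_line.strip('\n')
--
--         if pbxproj_line == tag:
--             return build_line_start + 1
--         build_line_start = build_line_start + 1
--     return -1
-- ===== SOURCE B (Python) =====
-- def get_build_file_line_start(pbxproj_contents, tag, start=0):
--     """
--     :param pbxproj_contents: line by line list of the pbxproj file content
--     :param tag: the c-style comment that marks the starting point of the data sought after
--     :param start: offset into the buffer
--     :return: the line where the tag was found, -1 if not found
--     """
--     for i in range(max(start, 0), len(pbxproj_contents)):
--         if pbxproj_contents[i].strip('\n') == tag:
--             return i + 1
--     return -1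
-- ===== Notes on version B (the rewrite author's own statement) =====
-- stated objective: simpler
-- what changed: Replaces A's single loop with a skip-counter (which, for start != 0, only ever examines the one line at index start) by a direct index scan over range(max(start,0), len), returning the first 1-based line number whose line stripped of newlines equals the tag.
-- intended difference: When start != 0 and the tag does not sit exactly at index start (including negative or out-of-range start) but does occur at some line index >= max(start,0), A returns -1 because its skip-counter bug examines only the single line at index start, while B returns the 1-based line number of the first such occurrence, the scan-from-offset the docstring describes. — e.g. on get_build_file_line_start(["a", "b", "a"], "a", 1): A returns -1, B returns 3
import Mathlib
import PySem

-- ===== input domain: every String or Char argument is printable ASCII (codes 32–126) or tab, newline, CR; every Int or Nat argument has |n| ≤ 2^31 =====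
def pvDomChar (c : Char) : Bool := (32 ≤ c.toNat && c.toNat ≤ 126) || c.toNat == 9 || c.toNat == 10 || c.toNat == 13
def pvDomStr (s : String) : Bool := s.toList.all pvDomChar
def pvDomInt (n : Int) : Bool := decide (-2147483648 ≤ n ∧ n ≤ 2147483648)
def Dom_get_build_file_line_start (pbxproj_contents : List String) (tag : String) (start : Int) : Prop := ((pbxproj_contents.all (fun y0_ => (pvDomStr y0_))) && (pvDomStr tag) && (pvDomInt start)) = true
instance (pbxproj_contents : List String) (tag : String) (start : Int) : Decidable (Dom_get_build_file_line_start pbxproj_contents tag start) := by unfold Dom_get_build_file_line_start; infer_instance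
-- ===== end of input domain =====

-- B replaces A's skip-counter loop (which for start ≠ 0 only examines the single line at
-- index start) by a direct index scan from max(start,0); objective: simpler, with the
-- intended scan-from-offset behaviour stated as D_ below.


-- ===== PORT A =====
-- the for-loop with its skip-counter `build_line_start`
def pvLoopA (lines : List String) (tag : String) (start : Int) (c : Int) : Int :=
  match lines with
  | [] => -1
  | l :: ls =>
    if start ≠ 0 ∧ c ≠ start then pvLoopA ls tag start (c + 1)
    else if PySem.Str.stripChars l "\n" = tag then c + 1
    else pvLoopA ls tag start (c + 1)

def get_build_file_line_start (pbxproj_contents : List String) (tag : String) (start : Int) : Int :=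
  pvLoopA pbxproj_contents tag start 0

-- ===== PORT B =====
-- the for-loop over `range(max(start,0), len(pbxproj_contents))`
def pvScanB (lines : List String) (tag : String) (idxs : List Int) : Int :=
  match idxs with
  | [] => -1
  | i :: rest =>
    if PySem.Str.stripChars (PySem.List.pyGetD lines i "") "\n" = tag then i + 1
    else pvScanB lines tag rest

def get_build_file_line_start_alt (pbxproj_contents : List String) (tag : String) (start : Int) : Int :=
  pvScanB pbxproj_contents tag (PySem.List.pyRange (max start 0) (PySem.List.len pbxproj_contents) 1)

-- ===== PRECONDITION & SPEC =====
-- When start ≠ 0 and the tag does not sit exactly at index start (including negative or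
-- out-of-range start) but does occur at some line index ≥ max(start,0), A returns -1
-- (its skip-counter only ever examines the single line at index start) while B returns
-- the 1-based line number of the first such occurrence — the intended scan-from-offset.
def D_get_build_file_line_start (pbxproj_contents : List String) (tag : String) (start : Int) : Prop :=
  start ≠ 0 ∧
  (∃ l ∈ pbxproj_contents.drop (max start 0).toNat, PySem.Str.stripChars l "\n" = tag) ∧
  ¬ (0 ≤ start ∧ ∃ h : start.toNat < pbxproj_contents.length,
      PySem.Str.stripChars pbxproj_contents[start.toNat] "\n" = tag)
instance (pbxproj_contents : List String) (tag : String) (start : Int) : Decidable (D_get_build_file_line_start pbxproj_contents tag start) := by unfold D_get_build_file_line_start; infer_instance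

def Spec_get_build_file_line_start (pbxproj_contents : List String) (tag : String) (start : Int) (out : Int) : Prop := ¬ D_get_build_file_line_start pbxproj_contents tag start → out = get_build_file_line_start_alt pbxproj_contents tag start
instance (pbxproj_contents : List String) (tag : String) (start : Int) (out : Int) : Decidable (Spec_get_build_file_line_start pbxproj_contents tag start out) := by unfold Spec_get_build_file_line_start; infer_instance

def pvDiffWitness_get_build_file_line_start : List String × String × Int := (["a", "b", "a"], "a", 1)
def pvDiffWitnessOut_get_build_file_line_start : Int × Int := (-1, 3)

-- ===== CLAIM (what is proved, stated in full; the proofs are below) =====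
def Claim_unchanged_get_build_file_line_start : Prop := ∀ (pbxproj_contents : List String) (tag : String) (start : Int), Dom_get_build_file_line_start pbxproj_contents tag start → Spec_get_build_file_line_start pbxproj_contents tag start (get_build_file_line_start pbxproj_contents tag start)
def Claim_changed_get_build_file_line_start : Prop := Dom_get_build_file_line_start (pvDiffWitness_get_build_file_line_start.1) (pvDiffWitness_get_build_file_line_start.2.1) (pvDiffWitness_get_build_file_line_start.2.2) ∧ D_get_build_file_line_start (pvDiffWitness_get_build_file_line_start.1) (pvDiffWitness_get_build_file_line_start.2.1) (pvDiffWitness_get_build_file_line_start.2.2) ∧ get_build_file_line_start (pvDiffWitness_get_build_file_line_start.1) (pvDiffWitness_get_build_file_line_start.2.1) (pvDiffWitness_get_build_file_line_start.2.2) = pvDiffWitnessOut_get_build_file_line_start.1 ∧ get_build_file_line_start_alt (pvDiffWitness_get_build_file_line_start.1) (pvDiffWitness_get_build_file_line_start.2.1) (pvDiffWitness_get_build_file_line_start.2.2) = pvDiffWitnessOut_get_build_file_line_start.2 ∧ pvDiffWitnessOut_get_build_file_line_start.1 ≠ pvDiffWitnessOut_get_build_file_line_start.2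
def Claim_exact_get_build_file_line_start : Prop := ∀ (pbxproj_contents : List String) (tag : String) (start : Int), Dom_get_build_file_line_start pbxproj_contents tag start → D_get_build_file_line_start pbxproj_contents tag start → get_build_file_line_start pbxproj_contents tag start ≠ get_build_file_line_start_alt pbxproj_contents tag start

-- ===== LEMMAS AND PROOFS =====

-- the match predicate both programs test
def pvP (tag l : String) : Bool := PySem.Str.stripChars l "\n" = tag

-- A's loop never matches once the counter has passed `start`
theorem pvLoopA_past (ls : List String) (tag : String) (start c : Int)
    (hs : start ≠ 0) (hc : start < c) : pvLoopA ls tag start c = -1 := by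
  induction ls generalizing c with
  | nil => rfl
  | cons l ls ih =>
    rw [pvLoopA, if_pos ⟨hs, by omega⟩]
    exact ih (c + 1) (by omega)

-- A's loop for start ≠ 0 and counter not yet past start: only line (start - c) is examined
theorem pvLoopA_skip (ls : List String) (tag : String) (start c : Int)
    (hs : start ≠ 0) (hc : c ≤ start) :
    pvLoopA ls tag start c =
      if (start - c).toNat < ls.length ∧ pvP tag (ls.getD (start - c).toNat "") = true then
        start + 1
      else -1 := by
  induction ls generalizing c with
  | nil =>
    rw [if_neg (by simp)]
    rfl
  | cons l ls ih =>
    by_cases hce : c = start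
    · subst hce
      rw [pvLoopA, if_neg (by simp)]
      have h0 : (c - c).toNat = 0 := by omega
      by_cases hp : PySem.Str.stripChars l "\n" = tag
      · rw [if_pos hp, if_pos ⟨by simp, by rw [h0]; simp [pvP, hp]⟩]
      · rw [if_neg hp, pvLoopA_past ls tag c (c + 1) hs (by omega), if_neg]
        rw [h0]
        simp [pvP, hp]
    · rw [pvLoopA, if_pos ⟨hs, hce⟩, ih (c + 1) (by omega)]
      have hk : (start - c).toNat = (start - (c + 1)).toNat + 1 := by omega
      simp only [hk, List.length_cons, List.getD_cons_succ, Nat.add_lt_add_iff_right]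

-- A's loop for start = 0 is a plain first-match scan
theorem pvLoopA_zero (ls : List String) (tag : String) (c : Int) :
    pvLoopA ls tag 0 c =
      match ls.findIdx? (pvP tag) with
      | some j => c + j + 1
      | none => -1 := by
  induction ls generalizing c with
  | nil => rfl
  | cons l ls ih =>
    rw [pvLoopA, if_neg (by simp), List.findIdx?_cons]
    by_cases hp : PySem.Str.stripChars l "\n" = tag
    · rw [if_pos hp, if_pos (by simp [pvP, hp])]
      simp
    · rw [if_neg hp, ih (c + 1), if_neg (by simp [pvP, hp])]
      cases ls.findIdx? (pvP tag) with
      | none => rfl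
      | some j => simp; omega

-- B's range scan equals a first-match scan over the dropped suffix
theorem pvScanB_range (full : List String) (tag : String) (a : Int) (ha : 0 ≤ a) :
    pvScanB full tag (PySem.List.pyRange a (PySem.List.len full) 1) =
      match (full.drop a.toNat).findIdx? (pvP tag) with
      | some j => a + j + 1
      | none => -1 := by
  by_cases hlt : a < PySem.List.len full
  · have hlen : a.toNat < full.length := by
      simp [PySem.List.len_eq] at hlt; omega
    rw [PySem.List.pyRange_one_cons hlt, pvScanB]
    have hdrop : full.drop a.toNat = full[a.toNat] :: full.drop (a.toNat + 1) :=
      (List.getElem_cons_drop hlen).symm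
    rw [PySem.List.pyGetD_eq_getElem full "" ha (by simpa [PySem.List.len_eq] using hlt)]
    by_cases hp : PySem.Str.stripChars full[a.toNat] "\n" = tag
    · rw [if_pos hp]
      have hfi : (full.drop a.toNat).findIdx? (pvP tag) = some 0 := by
        rw [hdrop, List.findIdx?_cons, if_pos (by simp [pvP, hp])]
      rw [hfi]
      simp
    · rw [if_neg hp, pvScanB_range full tag (a + 1) (by omega)]
      have hfi : (full.drop a.toNat).findIdx? (pvP tag) =
          ((full.drop (a.toNat + 1)).findIdx? (pvP tag)).map (fun i => i + 1) := by
        rw [hdrop, List.findIdx?_cons, if_neg (by simp [pvP, hp])]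
      rw [hfi]
      have hnt : (a + 1).toNat = a.toNat + 1 := by omega
      rw [hnt]
      cases (full.drop (a.toNat + 1)).findIdx? (pvP tag) with
      | none => rfl
      | some j => simp; omega
  · have h1 : PySem.List.pyRange a (PySem.List.len full) 1 = [] :=
      PySem.List.pyRange_one_eq_nil (by omega)
    have h2 : full.drop a.toNat = [] := by
      apply List.drop_eq_nil_of_le
      simp [PySem.List.len_eq] at hlt; omega
    rw [h1, h2]
    rfl
termination_by (PySem.List.len full - a).toNat
decreasing_by simp [PySem.List.len_eq] at *; omega

-- no match in a list ↔ findIdx? is none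
theorem pvNoMatch (ls : List String) (tag : String)
    (h : ¬ ∃ l ∈ ls, PySem.Str.stripChars l "\n" = tag) :
    ls.findIdx? (pvP tag) = none := by
  rw [List.findIdx?_eq_none_iff]
  intro x hx
  simp only [pvP, decide_eq_false_iff_not]
  exact fun he => h ⟨x, hx, he⟩

theorem get_build_file_line_start_unchanged (pbxproj_contents : List String) (tag : String)
    (start : Int) (hnd : ¬ D_get_build_file_line_start pbxproj_contents tag start) :
    get_build_file_line_start pbxproj_contents tag start =
      get_build_file_line_start_alt pbxproj_contents tag start := by
  unfold get_build_file_line_start get_build_file_line_start_alt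
  by_cases hs : start = 0
  · subst hs
    rw [pvLoopA_zero, (by simp : max (0 : Int) 0 = 0), pvScanB_range pbxproj_contents tag 0 le_rfl]
    simp
  · unfold D_get_build_file_line_start at hnd
    push Not at hnd
    by_cases hneg : start < 0
    · -- start < 0: A returns -1 immediately; B scans the whole list, which has no match
      rw [pvLoopA_past pbxproj_contents tag start 0 hs (by omega)]
      have hmax : max start 0 = 0 := by omega
      rw [hmax, pvScanB_range pbxproj_contents tag 0 le_rfl]
      have hno : ¬ ∃ l ∈ pbxproj_contents.drop (0 : Int).toNat,
          PySem.Str.stripChars l "\n" = tag := by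
        intro hex
        exact absurd (hnd hs (by rw [hmax]; exact hex)).1 (by omega)
      rw [pvNoMatch _ _ hno]
    · -- start > 0
      have hpos : 0 < start := by omega
      have hmax : max start 0 = start := by omega
      rw [pvLoopA_skip pbxproj_contents tag start 0 hs (by omega), hmax,
        pvScanB_range pbxproj_contents tag start (by omega)]
      have hsub : (start - 0).toNat = start.toNat := by omega
      by_cases hat : ∃ h : start.toNat < pbxproj_contents.length,
          PySem.Str.stripChars pbxproj_contents[start.toNat] "\n" = tag
      · obtain ⟨hlen, hp⟩ := hat
        rw [if_pos ⟨by omega, by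
          rw [hsub, List.getD_eq_getElem _ _ hlen]
          simp [pvP, hp]⟩]
        have hdrop : pbxproj_contents.drop start.toNat =
            pbxproj_contents[start.toNat] :: pbxproj_contents.drop (start.toNat + 1) :=
          (List.getElem_cons_drop hlen).symm
        have hfi : (pbxproj_contents.drop start.toNat).findIdx? (pvP tag) = some 0 := by
          rw [hdrop, List.findIdx?_cons, if_pos (by simp [pvP, hp])]
        rw [hfi]
        simp
      · have hno : ¬ ∃ l ∈ pbxproj_contents.drop start.toNat,
            PySem.Str.stripChars l "\n" = tag := by
          intro hex
          exact hat (hnd hs (by rw [hmax]; exact hex)).2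
        rw [pvNoMatch _ _ hno, if_neg]
        intro ⟨hlt, hp⟩
        rw [hsub] at hlt hp
        refine hat ⟨hlt, ?_⟩
        rw [List.getD_eq_getElem _ _ hlt] at hp
        simpa [pvP] using hp

-- ===== VERDICT (by name: the statement is the Claim_ definition above) =====
theorem get_build_file_line_start_spec : Claim_unchanged_get_build_file_line_start := by
  intro pbx tag start _ hnd
  exact get_build_file_line_start_unchanged pbx tag start hnd

theorem get_build_file_line_start_changed : Claim_changed_get_build_file_line_start := by
  unfold Claim_changed_get_build_file_line_start; decide

theorem get_build_file_line_start_tight : Claim_exact_get_build_file_line_start := by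
  intro pbx tag start _ hd
  obtain ⟨hs, hex, hnat⟩ := hd
  -- A returns -1
  have hA : get_build_file_line_start pbx tag start = -1 := by
    unfold get_build_file_line_start
    by_cases hneg : start < 0
    · exact pvLoopA_past pbx tag start 0 hs (by omega)
    · rw [pvLoopA_skip pbx tag start 0 hs (by omega), if_neg]
      intro ⟨hlt, hp⟩
      have hsub : (start - 0).toNat = start.toNat := by omega
      rw [hsub] at hlt hp
      rw [List.getD_eq_getElem _ _ hlt] at hp
      exact hnat ⟨by omega, hlt, by simpa [pvP] using hp⟩
  -- B returns a positive line number
  have hB : 0 < get_build_file_line_start_alt pbx tag start := by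
    unfold get_build_file_line_start_alt
    rw [pvScanB_range pbx tag (max start 0) (by omega)]
    obtain ⟨l, hmem, hp⟩ := hex
    have hne : (pbx.drop (max start 0).toNat).findIdx? (pvP tag) ≠ none := by
      intro hn
      rw [List.findIdx?_eq_none_iff] at hn
      have := hn l hmem
      simp [pvP, hp] at this
    cases hfi : (pbx.drop (max start 0).toNat).findIdx? (pvP tag) with
    | none => exact absurd hfi hne
    | some j =>
      simp
      omega
  omega
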